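-- pv_equiv track=rewrite | github.com/SayakaMiura/SCAN | SCAN_Pipeline_FIX.py | get_variant_count
-- ===== SOURCE A (Python) =====
-- def get_variant_count(list_of_sequences, condition): # condition referes to missing data counted or not counted
--     count = []
--     for i in range(len(list_of_sequences[1])):
--         if condition == True:
--             count_of_variants = [seq[i] for seq in list_of_sequences if seq[i] != 'A'] #change to seq[i] != 'A'
--             count.append(len(count_of_variants))
--         if condition == False:
--             count_of_variants = [seq[i] for seq in list_of_sequences if seq[i] == 'T']
--             count.append(len(count_of_variants))
--     return count
-- ===== SOURCE B (Python) =====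
-- def get_variant_count(list_of_sequences, condition):
--     n = len(list_of_sequences[1])
--     count = [0] * n
--     for seq in list_of_sequences:
--         count = [c + ((seq[i] != 'A') if condition else (seq[i] == 'T'))
--                  for i, c in zip(range(n), count)]
--     return count
-- ===== Notes on version B (the rewrite author's own statement) =====
-- stated objective: alternative
-- what changed: A scans column-major, rebuilding the whole column via a list comprehension for each position; B fixes the width once, then makes one row-major pass over the sequences, updating a running per-column counter vector with zip, so the per-column comprehensions disappear.
import Mathlib
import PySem

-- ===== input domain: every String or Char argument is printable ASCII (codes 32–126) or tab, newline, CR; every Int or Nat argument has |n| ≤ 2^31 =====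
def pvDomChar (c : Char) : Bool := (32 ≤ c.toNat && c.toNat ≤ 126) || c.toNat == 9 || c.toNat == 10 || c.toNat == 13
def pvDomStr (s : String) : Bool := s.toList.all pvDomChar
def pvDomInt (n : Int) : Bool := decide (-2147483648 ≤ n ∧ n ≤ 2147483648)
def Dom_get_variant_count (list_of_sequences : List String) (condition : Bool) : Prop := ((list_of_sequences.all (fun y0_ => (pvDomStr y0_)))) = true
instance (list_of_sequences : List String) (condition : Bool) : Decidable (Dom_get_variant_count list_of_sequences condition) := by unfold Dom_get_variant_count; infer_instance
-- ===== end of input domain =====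

-- B replaces A's column-major per-index comprehensions with a single row-major pass over a running per-column counter vector (alternative decomposition, same cost).


-- ===== PORT A =====
-- Port of A: for each column index i of list_of_sequences[1], build the comprehension
-- of matching characters and append its length.  Out-of-range accesses (excluded by Pre_)
-- use a default ' ' where Python would raise.
def get_variant_count (list_of_sequences : List String) (condition : Bool) : List Int :=
  let s1 := (PySem.List.pyGet? list_of_sequences 1).getD ""
  (PySem.List.pyRange 0 (PySem.Str.len s1) 1).foldl
    (fun count i =>
      let count :=
        if condition == true then
          count ++ [(((list_of_sequences.filter
                (fun seq => !((PySem.Str.pyGet? seq i).getD ' ' == 'A'))).map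
                (fun seq => (PySem.Str.pyGet? seq i).getD ' ')).length : Int)]
        else count
      let count :=
        if condition == false then
          count ++ [(((list_of_sequences.filter
                (fun seq => (PySem.Str.pyGet? seq i).getD ' ' == 'T')).map
                (fun seq => (PySem.Str.pyGet? seq i).getD ' ')).length : Int)]
        else count
      count) []

-- ===== PORT B =====
-- Port of B: width n from sequence 1, then one row-major pass folding a per-column
-- counter vector (zip of range n with the running counts).
def get_variant_count_alt (list_of_sequences : List String) (condition : Bool) : List Int :=
  let n := ((PySem.List.pyGet? list_of_sequences 1).getD "").toList.length
  list_of_sequences.foldl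
    (fun count seq =>
      ((List.range n).zip count).map
        (fun p => p.2 +
          (if (if condition then !((PySem.Str.pyGet? seq (p.1 : Int)).getD ' ' == 'A')
               else ((PySem.Str.pyGet? seq (p.1 : Int)).getD ' ' == 'T'))
           then 1 else 0)))
    (List.replicate n (0 : Int))

-- ===== PRECONDITION & SPEC =====
-- Pre_ is exactly where A returns: list_of_sequences[1] must exist (else IndexError)
-- and every sequence must be at least as long as sequence 1 (else seq[i] raises).
def Pre_get_variant_count (list_of_sequences : List String) (condition : Bool) : Prop :=
  2 ≤ list_of_sequences.length ∧
  ∀ s ∈ list_of_sequences,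
    (list_of_sequences.getD 1 "").toList.length ≤ s.toList.length
instance (list_of_sequences : List String) (condition : Bool) : Decidable (Pre_get_variant_count list_of_sequences condition) := by unfold Pre_get_variant_count; infer_instance
def pvWitness_get_variant_count : List String × Bool := (["ATG", "TAG"], true)
def Spec_get_variant_count (list_of_sequences : List String) (condition : Bool) (out : List Int) : Prop := out = get_variant_count_alt list_of_sequences condition
instance (list_of_sequences : List String) (condition : Bool) (out : List Int) : Decidable (Spec_get_variant_count list_of_sequences condition out) := by unfold Spec_get_variant_count; infer_instance

-- ===== CLAIM (what is proved, stated in full; the proofs are below) =====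
def Claim_equal_get_variant_count : Prop := ∀ (list_of_sequences : List String) (condition : Bool), Dom_get_variant_count list_of_sequences condition → Pre_get_variant_count list_of_sequences condition → Spec_get_variant_count list_of_sequences condition (get_variant_count list_of_sequences condition)

-- ===== LEMMAS AND PROOFS =====

lemma foldl_append_singleton {α β : Type} (l : List α) (f : α → β) (init : List β) :
    l.foldl (fun acc i => acc ++ [f i]) init = init ++ l.map f := by
  induction l generalizing init with
  | nil => simp
  | cons x xs ih => simp [List.foldl_cons, ih]

lemma b_step {n : Nat} (t : Nat → Bool) (g : Nat → Int) :
    ((List.range n).zip ((List.range n).map g)).map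
        (fun p => p.2 + (if t p.1 then 1 else 0))
      = (List.range n).map (fun i => g i + (if t i then 1 else 0)) := by
  have h : (List.range n).zip ((List.range n).map g)
      = (List.range n).map (fun i => (i, g i)) := by
    have := List.zip_map' (l := List.range n) (f := fun i : Nat => i) (g := g)
    simpa using this
  rw [h, List.map_map]
  rfl

lemma b_fold {n : Nat} (t : String → Nat → Bool) (xs : List String) (g : Nat → Int) :
    xs.foldl (fun count seq =>
        ((List.range n).zip count).map
          (fun p => p.2 + (if t seq p.1 then 1 else 0)))
        ((List.range n).map g)
      = (List.range n).map (fun i => g i + (xs.countP (fun s => t s i) : Int)) := by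
  induction xs generalizing g with
  | nil => simp
  | cons s xs ih =>
      rw [List.foldl_cons, b_step (t s) g, ih]
      refine List.map_congr_left (fun i _ => ?_)
      rw [List.countP_cons]
      by_cases h : t s i = true <;> simp [h] <;> omega

-- ===== VERDICT (by name: the statement is the Claim_ definition above) =====
theorem get_variant_count_spec : Claim_equal_get_variant_count := by
  intro xs condition _ _
  unfold Spec_get_variant_count get_variant_count get_variant_count_alt
  simp only [PySem.Str.len_eq]
  set s1 := (PySem.List.pyGet? xs 1).getD "" with hs1
  set n := s1.toList.length with hn
  have hrep : (List.replicate n (0 : Int)) = (List.range n).map (fun _ => (0 : Int)) := by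
    simp
  rw [hrep, b_fold (fun seq i =>
      if condition then !((PySem.Str.pyGet? seq (i : Int)).getD ' ' == 'A')
      else ((PySem.Str.pyGet? seq (i : Int)).getD ' ' == 'T')) xs (fun _ => (0 : Int))]
  have hrange : PySem.List.pyRange 0 (n : Int) 1 = (List.range n).map (fun k : Nat => (k : Int)) := by
    rw [PySem.List.pyRange_one]
    simp
  cases condition with
  | false =>
      simp only [show (false == true) = false from rfl, show (false == false) = true from rfl,
        Bool.false_eq_true, if_false, if_true]
      rw [hrange]
      rw [List.foldl_map, foldl_append_singleton]
      simp only [List.nil_append]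
      refine List.map_congr_left (fun i _ => ?_)
      simp [List.countP_eq_length_filter]
  | true =>
      simp only [show (true == false) = false from rfl, show (true == true) = true from rfl,
        Bool.false_eq_true, if_false, if_true]
      rw [hrange]
      rw [List.foldl_map, foldl_append_singleton]
      simp only [List.nil_append]
      refine List.map_congr_left (fun i _ => ?_)
      simp [List.countP_eq_length_filter]
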